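-- pv_equiv track=rewrite | github.com/Karna-Balaji-07/Python_2025 | Arrays/Subarrays/Two_Equal_sum_subarrays.py | subarray1
-- ===== SOURCE A (Python) =====
-- def subarray1(arr,n):
--     leftsum = 0
--     for i in range(n):
--         leftsum += arr[i]
--         rightsum = 0
--         for j in range(i+1,n):
--             rightsum += arr[j]
--         if leftsum == rightsum:
--             return i+1
--     return -1
-- ===== SOURCE B (Python) =====
-- def subarray1(arr, n):
--     if n <= 0:
--         return -1
--     prefixes = []
--     acc = 0
--     for x in arr[:n]:
--         acc += x
--         prefixes.append(acc)
--     total = prefixes[-1]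
--     for idx, p in enumerate(prefixes):
--         if 2 * p == total:
--             return idx + 1
--     return -1
-- ===== Notes on version B (the rewrite author's own statement) =====
-- stated objective: faster
-- what changed: B first materialises the running-prefix-sum list over arr[:n] (no per-index arr access), reads the total as its last entry, and then scans that list with enumerate for the first prefix p with 2*p == total, replacing A's quadratic inner right-sum rescan.
import Mathlib
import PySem

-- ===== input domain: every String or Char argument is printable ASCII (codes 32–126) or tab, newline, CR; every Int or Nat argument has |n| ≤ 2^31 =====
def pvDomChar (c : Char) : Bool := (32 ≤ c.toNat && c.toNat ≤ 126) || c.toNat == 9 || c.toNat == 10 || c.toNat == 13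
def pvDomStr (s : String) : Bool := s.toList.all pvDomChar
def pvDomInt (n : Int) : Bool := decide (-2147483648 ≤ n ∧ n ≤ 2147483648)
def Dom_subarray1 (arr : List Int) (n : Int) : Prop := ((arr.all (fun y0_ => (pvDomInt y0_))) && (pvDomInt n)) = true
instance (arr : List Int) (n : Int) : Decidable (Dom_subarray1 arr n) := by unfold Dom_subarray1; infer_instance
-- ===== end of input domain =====

-- B builds the prefix-sum list of arr[:n] once, reads the total as its last entry, and scans
-- it for the first prefix p with 2*p = total, instead of A's inner right-sum rescan per index
-- (objective: faster, asymptotic).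

-- ===== PORT A =====
-- inner loop of A: sum of arr[j] for j in range(a, n)
def pySumR (arr : List Int) (a n : Int) : Int :=
  (PySem.List.pyRange a n 1).foldl (fun s j => s + PySem.List.pyGetD arr j 0) 0

def loopA (arr : List Int) (n : Int) : List Int → Int → Int
  | [], _ => -1
  | i :: rest, leftsum =>
    let ls := leftsum + PySem.List.pyGetD arr i 0
    let rightsum := pySumR arr (i + 1) n
    if ls = rightsum then i + 1 else loopA arr n rest ls

def subarray1 (arr : List Int) (n : Int) : Int :=
  loopA arr n (PySem.List.pyRange 0 n 1) 0

-- ===== PORT B =====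
-- the prefix-building loop: acc += x; prefixes.append(acc)
def buildPref : List Int → Int → List Int → List Int
  | [], _, ps => ps
  | x :: rest, acc, ps => buildPref rest (acc + x) (ps ++ [acc + x])

-- the search loop: for idx, p in enumerate(prefixes): if 2*p == total: return idx+1
def findSplit (total : Int) : List (Int × Int) → Int
  | [] => -1
  | (idx, p) :: rest => if 2 * p = total then idx + 1 else findSplit total rest

def subarray1_alt (arr : List Int) (n : Int) : Int :=
  if n ≤ 0 then -1
  else
    let pref := buildPref (PySem.List.slice arr none (some n)) 0 []
    -- prefixes[-1]; Python raises only when pref = [] (0 < n and arr = []), excluded by Pre_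
    let total := PySem.List.pyGetD pref (-1) 0
    findSplit total (PySem.List.enumerate pref 0)

-- ===== PRECONDITION & SPEC =====
-- A indexes arr[i] for every i < n, so it raises IndexError exactly when n > len(arr)
def Pre_subarray1 (arr : List Int) (n : Int) : Prop := n ≤ (arr.length : Int)
instance (arr : List Int) (n : Int) : Decidable (Pre_subarray1 arr n) := by
  unfold Pre_subarray1; infer_instance

def pvWitness_subarray1 : List Int × Int := ([1, 2, 3], 3)

def Spec_subarray1 (arr : List Int) (n : Int) (out : Int) : Prop := out = subarray1_alt arr n
instance (arr : List Int) (n : Int) (out : Int) : Decidable (Spec_subarray1 arr n out) := by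
  unfold Spec_subarray1; infer_instance

-- ===== CLAIM (what is proved, stated in full; the proofs are below) =====
def Claim_equal_subarray1 : Prop := ∀ (arr : List Int) (n : Int), Dom_subarray1 arr n → Pre_subarray1 arr n → Spec_subarray1 arr n (subarray1 arr n)

-- ===== LEMMAS AND PROOFS =====

-- proof-side view of B's prefix builder: the list of running sums starting from acc
def scanSums : List Int → Int → List Int
  | [], _ => []
  | x :: rest, acc => (acc + x) :: scanSums rest (acc + x)

lemma buildPref_eq_scanSums (xs : List Int) : ∀ acc ps, buildPref xs acc ps = ps ++ scanSums xs acc := by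
  induction xs with
  | nil => intro acc ps; simp [buildPref, scanSums]
  | cons x r ih => intro acc ps; simp [buildPref, scanSums, ih]

lemma scanSums_ne_nil (x : Int) (r : List Int) (acc : Int) : scanSums (x :: r) acc ≠ [] := by
  simp [scanSums]

lemma scanSums_getLast (xs : List Int) : ∀ (acc : Int) (h : scanSums xs acc ≠ []),
    (scanSums xs acc).getLast h = acc + xs.sum := by
  induction xs with
  | nil => intro acc h; simp [scanSums] at h
  | cons x r ih =>
    intro acc h
    cases r with
    | nil => simp [scanSums]
    | cons y s =>
      have h2 : scanSums (y :: s) (acc + x) ≠ [] := scanSums_ne_nil y s (acc + x)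
      have hstep : (scanSums (x :: y :: s) acc).getLast h =
          (scanSums (y :: s) (acc + x)).getLast h2 := List.getLast_cons h2
      rw [hstep, ih]
      simp; ring

lemma slice_cons (arr : List Int) (a n : Int) (ha : 0 ≤ a) (han : a < n) (hn : n ≤ (arr.length : Int)) :
    PySem.List.slice arr (some a) (some n) =
      PySem.List.pyGetD arr a 0 :: PySem.List.slice arr (some (a + 1)) (some n) := by
  have hlt : a.toNat < arr.length := by omega
  rw [PySem.List.slice_toNat arr ha (by omega), PySem.List.slice_toNat arr (by omega) (by omega : (0:Int) ≤ n),
    PySem.List.pyGetD_eq_getElem arr 0 ha (by omega),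
    List.drop_eq_getElem_cons hlt]
  have h1 : (a + 1).toNat = a.toNat + 1 := by omega
  have h2 : n.toNat - a.toNat = (n.toNat - (a + 1).toNat) + 1 := by omega
  rw [h2, List.take_succ_cons, h1]

lemma sum_slice (arr : List Int) (n : Int) (hn : n ≤ (arr.length : Int)) (hn0 : 0 ≤ n) :
    ∀ (k : Nat) (a : Int), 0 ≤ a → (n - a).toNat = k →
      (PySem.List.slice arr (some a) (some n)).sum = pySumR arr a n := by
  intro k
  induction k with
  | zero =>
    intro a ha hk
    have hna : n ≤ a := by omega
    rw [PySem.List.slice_toNat arr ha (by omega : (0:Int) ≤ n)]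
    have : n.toNat - a.toNat = 0 := by omega
    rw [this]
    unfold pySumR
    rw [PySem.List.pyRange_one_eq_nil hna]
    simp
  | succ k ih =>
    intro a ha hk
    have han : a < n := by omega
    rw [slice_cons arr a n ha han hn, List.sum_cons, ih (a + 1) (by omega) (by omega)]
    unfold pySumR
    rw [PySem.List.pyRange_one_cons han]
    simp only [List.foldl_cons, zero_add]
    rw [PySem.List.foldl_add, PySem.List.foldl_add]
    ring

-- loopA over indices a..n-1 equals B's search over the index-paired running sums of the slice
lemma main_loop (arr : List Int) (n : Int) (hn : n ≤ (arr.length : Int)) (total : Int) :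
    ∀ (xs : List Int) (a ls : Int), 0 ≤ a → a + (xs.length : Int) = n →
      xs = PySem.List.slice arr (some a) (some n) → total = ls + xs.sum →
      loopA arr n (PySem.List.pyRange a n 1) ls =
        findSplit total (PySem.List.enumerate (scanSums xs ls) a) := by
  intro xs
  induction xs with
  | nil =>
    intro a ls ha hlen _ _
    have hna : n ≤ a := by simp at hlen; omega
    rw [PySem.List.pyRange_one_eq_nil hna]
    simp [loopA, scanSums, PySem.List.enumerate_nil, findSplit]
  | cons x r ih =>
    intro a ls ha hlen hxs htot
    have han : a < n := by simp at hlen; omega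
    have hx : x = PySem.List.pyGetD arr a 0 ∧ r = PySem.List.slice arr (some (a + 1)) (some n) := by
      rw [slice_cons arr a n ha han hn] at hxs
      exact ⟨(List.cons.injEq _ _ _ _ ▸ hxs).1, (List.cons.injEq _ _ _ _ ▸ hxs).2⟩
    rw [PySem.List.pyRange_one_cons han]
    show (if ls + PySem.List.pyGetD arr a 0 = pySumR arr (a + 1) n then a + 1
          else loopA arr n (PySem.List.pyRange (a + 1) n 1) (ls + PySem.List.pyGetD arr a 0)) =
         findSplit total (PySem.List.enumerate ((ls + x) :: scanSums r (ls + x)) a)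
    rw [PySem.List.enumerate_cons]
    show _ = if 2 * (ls + x) = total then a + 1
             else findSplit total (PySem.List.enumerate (scanSums r (ls + x)) (a + 1))
    have hr : r.sum = pySumR arr (a + 1) n := by
      rw [hx.2]; exact sum_slice arr n hn (by omega) (n - (a + 1)).toNat (a + 1) (by omega) rfl
    have htot' : total = (ls + x) + pySumR arr (a + 1) n := by
      rw [htot, List.sum_cons, hr]; ring
    rw [← hx.1]
    by_cases hcond : ls + x = pySumR arr (a + 1) n
    · rw [if_pos hcond, if_pos (by omega)]
    · rw [if_neg hcond, if_neg (by omega)]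
      exact ih (a + 1) (ls + x) (by omega) (by simp at hlen ⊢; omega) hx.2
        (by rw [htot, List.sum_cons]; ring)

-- ===== VERDICT (by name: the statement is the Claim_ definition above) =====
theorem subarray1_spec : Claim_equal_subarray1 := by
  intro arr n _ hpre
  unfold Spec_subarray1 subarray1 subarray1_alt
  by_cases hn : n ≤ 0
  · rw [if_pos hn, PySem.List.pyRange_one_eq_nil hn]; rfl
  · rw [if_neg hn]
    rw [not_le] at hn
    have hpre' : n ≤ (arr.length : Int) := hpre
    have hxs0 : PySem.List.slice arr none (some n) = PySem.List.slice arr (some 0) (some n) := by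
      simp
    have hlenn : (PySem.List.slice arr (some 0) (some n)).length = n.toNat := by
      rw [PySem.List.slice_toNat arr le_rfl (by omega)]
      simp; omega
    cases hx : PySem.List.slice arr (some 0) (some n) with
    | nil =>
      exfalso
      rw [hx] at hlenn
      simp at hlenn
      omega
    | cons x r =>
      have hne : scanSums (x :: r) 0 ≠ [] := scanSums_ne_nil x r 0
      show loopA arr n (PySem.List.pyRange 0 n 1) 0 =
        findSplit
          (PySem.List.pyGetD (buildPref (PySem.List.slice arr none (some n)) 0 []) (-1) 0)
          (PySem.List.enumerate (buildPref (PySem.List.slice arr none (some n)) 0 []) 0)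
      rw [hxs0, hx, buildPref_eq_scanSums, List.nil_append,
        PySem.List.pyGetD_neg_one _ 0 hne, scanSums_getLast]
      have hlen : (0 : Int) + (((x :: r).length : Nat) : Int) = n := by
        rw [hx] at hlenn
        simp at hlenn ⊢
        omega
      exact main_loop arr n hpre' (0 + (x :: r).sum) (x :: r) 0 0 le_rfl hlen hx.symm rfl
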